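-- pv_equiv track=rewrite | github.com/ydb-platform/ydb | ydb/core/kqp/tools/combiner_perf/bin/format_markdown.py | samples_sorted_by_section
-- ===== SOURCE A (Python) =====
-- def samples_sorted_by_section(samples):
--     sort_orders = {
--         'testName': {},
--         'totalRows': {},
--         'spilling': {},
--         'blockSize': {},
--         'combinerMemLimit': {},
--         'hashType': {},
--         'numKeys': {},
--     }
--
--     for sample in samples:
--         for key in sort_orders.keys():
--             if key in sample:
--                 so = sort_orders[key]
--                 value = sample[key]
--                 if value not in so:
--                     so[value] = len(so)
--
--     def sort_order(sample):
--         result = []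
--         for key in sort_orders.keys():
--             if key not in sample:
--                 result.append(-1)
--                 continue
--             result.append(sort_orders[key][sample[key]])
--         return result
--
--     return sorted(samples, key=sort_order)
-- ===== SOURCE B (Python) =====
-- _KEYS = ('testName', 'totalRows', 'spilling', 'blockSize',
--          'combinerMemLimit', 'hashType', 'numKeys')
--
--
-- def samples_sorted_by_section(samples):
--     # LSD radix sort: one stable bucket pass per field, least-significant
--     # (last) field first.  Bucket order for a field is the order in which its
--     # values first appear in the original input; samples lacking the field go
--     # first.  No rank numbers and no comparison sort are built.
--     order = list(samples)
--     for key in reversed(_KEYS):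
--         firsts = []
--         for s in samples:
--             if key in s and s[key] not in firsts:
--                 firsts.append(s[key])
--         new_order = [s for s in order if key not in s]
--         for v in firsts:
--             new_order.extend(s for s in order if key in s and s[key] == v)
--         order = new_order
--     return order
-- ===== Notes on version B (the rewrite author's own statement) =====
-- stated objective: alternative
-- what changed: Replaces A's rank-dict construction plus comparison sort by key tuples with an LSD radix sort: seven stable bucket passes (least-significant field first) that partition the current order into an absent-field segment followed by value buckets taken in original first-appearance order, so no rank numbers, no key function and no call to sorted() exist at all.
import Mathlib
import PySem

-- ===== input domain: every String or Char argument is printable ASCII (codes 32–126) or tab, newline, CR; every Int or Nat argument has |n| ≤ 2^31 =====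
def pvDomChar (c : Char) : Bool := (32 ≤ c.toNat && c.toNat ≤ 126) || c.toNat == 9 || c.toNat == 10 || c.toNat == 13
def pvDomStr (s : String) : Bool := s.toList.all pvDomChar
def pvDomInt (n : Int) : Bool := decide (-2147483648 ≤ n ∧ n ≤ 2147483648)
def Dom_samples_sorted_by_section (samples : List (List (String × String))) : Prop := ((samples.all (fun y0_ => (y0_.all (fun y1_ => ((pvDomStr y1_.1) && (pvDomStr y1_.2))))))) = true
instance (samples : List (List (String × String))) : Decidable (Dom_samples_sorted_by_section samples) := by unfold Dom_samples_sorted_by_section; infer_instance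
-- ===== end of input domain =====

-- B replaces A's rank-dict construction plus comparison sort with an LSD radix
-- sort (seven stable bucket passes, buckets in first-appearance order);
-- objective: alternative — the return values are proved equal.

-- the fixed field list of sort_orders (shared literal of both Pythons)
def pvKeys : List String :=
  ["testName", "totalRows", "spilling", "blockSize", "combinerMemLimit", "hashType", "numKeys"]

-- 'key in sample' / 'sample[key]' on the Python dict behind the assoc list
def pvGet (sample : List (String × String)) (key : String) : Option String :=
  (PySem.Dict.ofList sample).get? key

-- {'testName': {}, …}: the initial dict of empty per-field dicts (A's literal)
def pvInitOrders : PySem.Dict String (PySem.Dict String Int) :=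
  PySem.Dict.ofList (pvKeys.map (fun k => (k, PySem.Dict.empty)))

-- ===== PORT A =====
-- body of A's inner ranking loop for one field of one sample
def pvRankField (sample : List (String × String))
    (so : PySem.Dict String (PySem.Dict String Int)) (key : String) :
    PySem.Dict String (PySem.Dict String Int) :=
  match pvGet sample key with
  | none => so                       -- 'if key in sample' fails
  | some value =>
    let d := so.getD key PySem.Dict.empty   -- sort_orders[key]; key is always present
    if d.contains value then so
    else so.insert key (d.insert value (d.size : Int))   -- so[value] = len(so)

-- one iteration of A's first loop: rank every field of one sample
def pvRankStep (so : PySem.Dict String (PySem.Dict String Int))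
    (sample : List (String × String)) : PySem.Dict String (PySem.Dict String Int) :=
  pvKeys.foldl (pvRankField sample) so

-- A's sort_order(sample); the 0 default is unreachable (the ranking pass
-- inserted every value that is present in some sample)
def pvSortOrder (orders : PySem.Dict String (PySem.Dict String Int))
    (sample : List (String × String)) : List Int :=
  pvKeys.foldl (fun result key =>
    match pvGet sample key with
    | none => result ++ [-1]
    | some value => result ++ [(orders.getD key PySem.Dict.empty).getD value 0]) []

def samples_sorted_by_section (samples : List (List (String × String))) :
    List (List (String × String)) :=
  PySem.List.sorted samples (pvSortOrder (samples.foldl pvRankStep pvInitOrders)) false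

-- ===== PORT B =====
-- body of B's firsts loop: collect a field's values in first-appearance order
def pvFB (key : String) (acc : List String) (s : List (String × String)) : List String :=
  match pvGet s key with
  | some v => if v ∈ acc then acc else acc ++ [v]
  | none => acc

-- firsts = values of 'key' in order of first appearance in the original input
def pvFirsts (samples : List (List (String × String))) (key : String) : List String :=
  samples.foldl (pvFB key) []

-- one stable bucket pass: samples lacking the field first, then one bucket per
-- value in first-appearance order (python: new_order = [missing]; extend per v)
def pvPass (samples : List (List (String × String)))
    (order : List (List (String × String))) (key : String) :
    List (List (String × String)) :=
  (pvFirsts samples key).foldl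
    (fun acc v => acc ++ order.filter (fun s => pvGet s key == some v))
    (order.filter (fun s => (pvGet s key).isNone))

-- LSD radix sort: one pass per field, least-significant (last) field first
def samples_sorted_by_section_alt (samples : List (List (String × String))) :
    List (List (String × String)) :=
  (pvKeys.reverse).foldl (pvPass samples) samples

-- ===== PRECONDITION & SPEC =====
def Spec_samples_sorted_by_section (samples : List (List (String × String))) (out : List (List (String × String))) : Prop := out = samples_sorted_by_section_alt samples
instance (samples : List (List (String × String))) (out : List (List (String × String))) : Decidable (Spec_samples_sorted_by_section samples out) := by unfold Spec_samples_sorted_by_section; infer_instance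

-- ===== CLAIM (what is proved, stated in full; the proofs are below) =====
def Claim_equal_samples_sorted_by_section : Prop := ∀ (samples : List (List (String × String))), Dom_samples_sorted_by_section samples → Spec_samples_sorted_by_section samples (samples_sorted_by_section samples)

-- ===== LEMMAS AND PROOFS =====

-- A's final rank state
def pvOrders (samples : List (List (String × String))) :
    PySem.Dict String (PySem.Dict String Int) :=
  samples.foldl pvRankStep pvInitOrders

-- the key component A's sort_order emits for one field, read off a rank state
def pvComp (orders : PySem.Dict String (PySem.Dict String Int))
    (sample : List (String × String)) (key : String) : Int :=
  match pvGet sample key with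
  | none => -1
  | some value => (orders.getD key PySem.Dict.empty).getD value 0

-- A's per-sample per-field ranking step projected to one field's dict
def pvStep (key : String) (d : PySem.Dict String Int)
    (s : List (String × String)) : PySem.Dict String Int :=
  match pvGet s key with
  | none => d
  | some v => if d.contains v then d else d.insert v (d.size : Int)

-- the dict holding first-appearance list acc with ranks s0, s0+1, …
def pvRepr (acc : List String) (s0 : Int) : PySem.Dict String Int :=
  PySem.Dict.mk ((PySem.List.enumerate acc s0).map (fun p => (p.2, p.1)))

theorem pvSortOrder_eq_map (orders : PySem.Dict String (PySem.Dict String Int))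
    (sample : List (String × String)) :
    pvSortOrder orders sample = pvKeys.map (pvComp orders sample) := by
  have hf : (fun (result : List Int) (key : String) =>
      match pvGet sample key with
      | none => result ++ [-1]
      | some value => result ++ [(orders.getD key PySem.Dict.empty).getD value 0])
      = fun result key => result ++ [pvComp orders sample key] := by
    funext result key
    cases hv : pvGet sample key <;> simp [pvComp, hv]
  rw [pvSortOrder, hf, PySem.List.foldl_append_singleton_eq_map, List.nil_append]

-- ---- reduction of A's dict-of-dicts fold to a per-field fold ----

theorem pvRankField_getD_ne (sample : List (String × String))
    (st : PySem.Dict String (PySem.Dict String Int)) (key k : String) (hne : k ≠ key) :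
    (pvRankField sample st key).getD k PySem.Dict.empty = st.getD k PySem.Dict.empty := by
  unfold pvRankField
  cases hv : pvGet sample key with
  | none => rfl
  | some v =>
    simp only []
    split
    · rfl
    · exact PySem.Dict.getD_insert_of_ne _ _ _ hne

theorem pvRankField_getD_self (sample : List (String × String))
    (st : PySem.Dict String (PySem.Dict String Int)) (key : String) :
    (pvRankField sample st key).getD key PySem.Dict.empty
      = pvStep key (st.getD key PySem.Dict.empty) sample := by
  unfold pvRankField pvStep
  cases hv : pvGet sample key with
  | none => rfl
  | some v =>
    simp only []
    split
    · rfl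
    · exact PySem.Dict.getD_insert_self _ _ _ _

theorem pvFoldKeys_getD_notmem (sample : List (String × String)) (ks : List String)
    (st : PySem.Dict String (PySem.Dict String Int)) (k : String) (hk : k ∉ ks) :
    (ks.foldl (pvRankField sample) st).getD k PySem.Dict.empty
      = st.getD k PySem.Dict.empty := by
  induction ks generalizing st with
  | nil => rfl
  | cons k0 ks ih =>
    have h1 : k ≠ k0 := fun he => hk (he ▸ List.mem_cons_self)
    have h2 : k ∉ ks := fun hm => hk (List.mem_cons_of_mem _ hm)
    rw [List.foldl_cons, ih _ h2, pvRankField_getD_ne _ _ _ _ h1]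

theorem pvFoldKeys_getD_mem (sample : List (String × String)) (ks : List String)
    (st : PySem.Dict String (PySem.Dict String Int)) (k : String)
    (hnd : ks.Nodup) (hk : k ∈ ks) :
    (ks.foldl (pvRankField sample) st).getD k PySem.Dict.empty
      = pvStep k (st.getD k PySem.Dict.empty) sample := by
  induction ks generalizing st with
  | nil => cases hk
  | cons k0 ks ih =>
    rw [List.foldl_cons]
    rcases List.mem_cons.1 hk with he | hm
    · subst he
      have h2 : k ∉ ks := (List.nodup_cons.1 hnd).1
      rw [pvFoldKeys_getD_notmem _ _ _ _ h2, pvRankField_getD_self]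
    · have hne : k ≠ k0 := by
        intro he; subst he; exact (List.nodup_cons.1 hnd).1 hm
      rw [ih _ (List.nodup_cons.1 hnd).2 hm, pvRankField_getD_ne _ _ _ _ hne]

theorem pvOrdersFold (l : List (List (String × String)))
    (st : PySem.Dict String (PySem.Dict String Int)) (k : String) (hk : k ∈ pvKeys) :
    (l.foldl pvRankStep st).getD k PySem.Dict.empty
      = l.foldl (pvStep k) (st.getD k PySem.Dict.empty) := by
  induction l generalizing st with
  | nil => rfl
  | cons s rest ih =>
    rw [List.foldl_cons, List.foldl_cons, ih]
    congr 1
    rw [show pvRankStep st s = pvKeys.foldl (pvRankField s) st from rfl,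
      pvFoldKeys_getD_mem s pvKeys st k (by decide) hk]

theorem pvInitOrders_getD (k : String) :
    pvInitOrders.getD k PySem.Dict.empty = PySem.Dict.empty := by
  rw [PySem.Dict.getD_eq_get?_getD]
  cases h : pvInitOrders.get? k with
  | none => rfl
  | some d =>
    have hmem : ∃ p ∈ pvInitOrders.items, p.2 = d := by
      have := h
      unfold PySem.Dict.get? at this
      cases hf : List.find? (fun p => p.1 == k) pvInitOrders.items with
      | none => rw [hf] at this; cases this
      | some p =>
        rw [hf] at this
        exact ⟨p, List.mem_of_find?_eq_some hf, by simpa using this⟩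
    obtain ⟨p, hp, hpd⟩ := hmem
    have hall : ∀ p ∈ pvInitOrders.items, p.2 = PySem.Dict.empty := by decide
    simp [← hpd, hall p hp]

-- ---- the per-field rank dict is the firsts list with its indices ----

theorem pvRepr_contains (acc : List String) (s0 : Int) (v : String) :
    (pvRepr acc s0).contains v = decide (v ∈ acc) := by
  induction acc generalizing s0 with
  | nil => simp [pvRepr, PySem.Dict.contains, PySem.List.enumerate_nil]
  | cons a acc ih =>
    simp only [pvRepr, PySem.Dict.contains, PySem.List.enumerate_cons, List.map_cons,
      List.any_cons] at *
    rw [ih (s0 + 1)]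
    by_cases h : a = v
    · simp [h]
    · simp [h, Ne.symm h]

theorem pvRepr_size (acc : List String) (s0 : Int) :
    (pvRepr acc s0).size = acc.length := by
  simp [pvRepr, PySem.Dict.size, PySem.List.length_enumerate]

theorem pvRepr_get (acc : List String) (s0 : Int) (i : Nat) (hi : i < acc.length)
    (hnd : acc.Nodup) :
    (pvRepr acc s0).get? acc[i] = some (s0 + i) := by
  induction acc generalizing s0 i with
  | nil => cases hi
  | cons a acc ih =>
    cases i with
    | zero =>
      simp only [pvRepr, PySem.List.enumerate_cons, List.map_cons, List.getElem_cons_zero,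
        PySem.Dict.get?_mk_cons, BEq.rfl, if_true]
      norm_num
    | succ j =>
      have hj : j < acc.length := by simpa using hi
      have hmem : acc[j] ∈ acc := List.getElem_mem hj
      have hne : a ≠ acc[j] := by
        intro he; exact (List.nodup_cons.1 hnd).1 (he ▸ hmem)
      have hih := ih (s0 + 1) j hj (List.nodup_cons.1 hnd).2
      simp only [pvRepr, PySem.List.enumerate_cons, List.map_cons] at hih ⊢
      rw [List.getElem_cons_succ, PySem.Dict.get?_mk_cons, if_neg (by simpa using hne), hih]
      congr 1
      push_cast
      ring

theorem pvRepr_insert (acc : List String) (v : String) (hm : v ∉ acc) :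
    (pvRepr acc 0).insert v ((pvRepr acc 0).size : Int) = pvRepr (acc ++ [v]) 0 := by
  unfold PySem.Dict.insert
  rw [pvRepr_contains]
  simp only [hm, decide_false, Bool.false_eq_true, if_false]
  rw [pvRepr_size]
  unfold pvRepr
  rw [show PySem.List.enumerate (acc ++ [v]) 0
      = PySem.List.enumerate acc 0 ++ [(((0 : Int) + acc.length), v)] by
    rw [PySem.List.enumerate_append]
    simp [PySem.List.enumerate_cons, PySem.List.enumerate_nil]]
  simp

theorem pvStepFold_repr (k : String) (l : List (List (String × String)))
    (acc : List String) :
    l.foldl (pvStep k) (pvRepr acc 0) = pvRepr (l.foldl (pvFB k) acc) 0 := by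
  induction l generalizing acc with
  | nil => rfl
  | cons s rest ih =>
    rw [List.foldl_cons, List.foldl_cons]
    have hstep : pvStep k (pvRepr acc 0) s = pvRepr (pvFB k acc s) 0 := by
      unfold pvStep pvFB
      cases hv : pvGet s k with
      | none => rfl
      | some v =>
        simp only []
        rw [pvRepr_contains]
        by_cases hm : v ∈ acc
        · simp [hm]
        · simp only [hm, decide_false, Bool.false_eq_true, if_false]
          exact pvRepr_insert acc v hm
    rw [hstep, ih]

theorem pvOrders_repr (samples : List (List (String × String))) (k : String)
    (hk : k ∈ pvKeys) :
    (pvOrders samples).getD k PySem.Dict.empty = pvRepr (pvFirsts samples k) 0 := by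
  rw [pvOrders, pvOrdersFold _ _ _ hk, pvInitOrders_getD]
  have h0 : (PySem.Dict.empty : PySem.Dict String Int) = pvRepr [] 0 := rfl
  rw [h0, pvStepFold_repr]
  rfl

-- ---- facts about the firsts list ----

theorem pvFB_subset (k : String) (acc : List String) (s : List (String × String)) :
    acc ⊆ pvFB k acc s := by
  unfold pvFB
  cases pvGet s k with
  | none => exact fun _ h => h
  | some v =>
    simp only []
    split
    · exact fun _ h => h
    · exact fun _ h => List.mem_append_left _ h

theorem pvFirsts_mono (k : String) (l : List (List (String × String)))
    (acc : List String) : acc ⊆ l.foldl (pvFB k) acc := by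
  induction l generalizing acc with
  | nil => exact fun _ h => h
  | cons s rest ih =>
    rw [List.foldl_cons]
    exact fun x hx => ih _ (pvFB_subset k acc s hx)

theorem pvFirsts_complete_aux (k : String) (l : List (List (String × String)))
    (acc : List String) (s : List (String × String)) (v : String) (hs : s ∈ l)
    (hv : pvGet s k = some v) : v ∈ l.foldl (pvFB k) acc := by
  induction l generalizing acc with
  | nil => cases hs
  | cons s0 rest ih =>
    rw [List.foldl_cons]
    rcases List.mem_cons.1 hs with he | hm
    · subst he
      apply pvFirsts_mono
      unfold pvFB
      rw [hv]
      show v ∈ if v ∈ acc then acc else acc ++ [v]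
      by_cases h : v ∈ acc
      · rw [if_pos h]; exact h
      · rw [if_neg h]; exact List.mem_append_right _ List.mem_cons_self
    · exact ih _ hm

theorem pvFirsts_complete (k : String) (samples : List (List (String × String)))
    (s : List (String × String)) (v : String) (hs : s ∈ samples)
    (hv : pvGet s k = some v) : v ∈ pvFirsts samples k :=
  pvFirsts_complete_aux k samples [] s v hs hv

theorem pvFirsts_nodup_aux (k : String) (l : List (List (String × String)))
    (acc : List String) (h : acc.Nodup) : (l.foldl (pvFB k) acc).Nodup := by
  induction l generalizing acc with
  | nil => exact h
  | cons s rest ih =>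
    rw [List.foldl_cons]
    apply ih
    unfold pvFB
    cases pvGet s k with
    | none => exact h
    | some v =>
      show (if v ∈ acc then acc else acc ++ [v]).Nodup
      by_cases hm : v ∈ acc
      · rw [if_pos hm]; exact h
      · rw [if_neg hm, List.nodup_append]
        refine ⟨h, List.nodup_singleton v, fun a ha b hb => ?_⟩
        rw [List.mem_singleton] at hb
        exact fun he => hm (hb ▸ he ▸ ha)

theorem pvFirsts_nodup (k : String) (samples : List (List (String × String))) :
    (pvFirsts samples k).Nodup :=
  pvFirsts_nodup_aux k samples [] List.nodup_nil

-- ranks read off the final state: value i of the firsts list has rank i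
def pvRank (samples : List (List (String × String))) (k : String) (v : String) : Int :=
  ((pvOrders samples).getD k PySem.Dict.empty).getD v 0

theorem pvRank_firsts (samples : List (List (String × String))) (k : String)
    (hk : k ∈ pvKeys) (i : Nat) (hi : i < (pvFirsts samples k).length) :
    pvRank samples k ((pvFirsts samples k)[i]) = i := by
  unfold pvRank
  rw [pvOrders_repr samples k hk, PySem.Dict.getD_eq_get?_getD,
    pvRepr_get _ 0 i hi (pvFirsts_nodup k samples)]
  simp

theorem pvComp_eq_rank (samples : List (List (String × String)))
    (s : List (String × String)) (k : String) (v : String) (hv : pvGet s k = some v) :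
    pvComp (pvOrders samples) s k = pvRank samples k v := by
  simp [pvComp, hv, pvRank]

theorem pvComp_none (samples : List (List (String × String)))
    (s : List (String × String)) (k : String) (hv : pvGet s k = none) :
    pvComp (pvOrders samples) s k = -1 := by
  simp [pvComp, hv]

-- ===== the decorated (ghost) run of B =====

-- B's bucket pass lifted to index-decorated samples
def pvPass' (samples : List (List (String × String)))
    (order : List (Int × List (String × String))) (key : String) :
    List (Int × List (String × String)) :=
  (pvFirsts samples key).foldl
    (fun acc v => acc ++ order.filter (fun p => pvGet p.2 key == some v))
    (order.filter (fun p => (pvGet p.2 key).isNone))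

-- the strict sort key of a decorated sample over a suffix ks of the fields
def pvSKey (samples : List (List (String × String))) (ks : List String)
    (p : Int × List (String × String)) : List Int :=
  ks.map (fun k => pvComp (pvOrders samples) p.2 k) ++ [p.1]

-- ---- stripping the decoration turns pvPass' into B's pvPass ----

theorem pvPass'_map_snd (samples : List (List (String × String)))
    (o' : List (Int × List (String × String))) (k : String) :
    (pvPass' samples o' k).map (fun p => p.2)
      = pvPass samples (o'.map (fun p => p.2)) k := by
  unfold pvPass' pvPass
  rw [PySem.List.foldl_append_eq_flatMap, PySem.List.foldl_append_eq_flatMap,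
    List.map_append, List.map_flatMap]
  have hb : ∀ (q : List (String × String) → Bool),
      ((o'.filter (fun p => q p.2)).map (fun p => p.2))
        = (o'.map (fun p => p.2)).filter q := by
    intro q; rw [List.filter_map]; rfl
  rw [hb (fun s => (pvGet s k).isNone)]
  congr 1
  have hf : (fun v => (o'.filter (fun p => pvGet p.2 k == some v)).map (fun p => p.2))
      = fun v => (o'.map (fun p => p.2)).filter (fun s => pvGet s k == some v) := by
    funext v; exact hb (fun s => pvGet s k == some v)
  rw [hf]

theorem pvFold_map_snd (samples : List (List (String × String))) (ks : List String)
    (o' : List (Int × List (String × String))) :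
    ((ks.foldl (pvPass' samples) o').map (fun p => p.2))
      = ks.foldl (pvPass samples) (o'.map (fun p => p.2)) := by
  induction ks generalizing o' with
  | nil => rfl
  | cons k ks ih => rw [List.foldl_cons, List.foldl_cons, ih, pvPass'_map_snd]

-- ---- each bucket pass is a permutation ----

theorem pvFlatMap_filter_cons_not (k : String) (p : Int × List (String × String))
    (rest : List (Int × List (String × String))) (vs : List String)
    (h : ∀ v ∈ vs, (pvGet p.2 k == some v) = false) :
    vs.flatMap (fun v => (p :: rest).filter (fun q => pvGet q.2 k == some v))
      = vs.flatMap (fun v => rest.filter (fun q => pvGet q.2 k == some v)) := by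
  induction vs with
  | nil => rfl
  | cons v vs ih =>
    rw [List.flatMap_cons, List.flatMap_cons,
      ih (fun w hw => h w (List.mem_cons_of_mem _ hw))]
    congr 1
    simp [h v List.mem_cons_self]

theorem pvFlatMap_filter_cons_mem (k : String) (p : Int × List (String × String))
    (rest : List (Int × List (String × String))) (vs : List String) (hnd : vs.Nodup)
    (v0 : String) (hv : pvGet p.2 k = some v0) (hv0 : v0 ∈ vs) :
    (vs.flatMap (fun v => (p :: rest).filter (fun q => pvGet q.2 k == some v))).Perm
      (p :: vs.flatMap (fun v => rest.filter (fun q => pvGet q.2 k == some v))) := by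
  induction vs with
  | nil => cases hv0
  | cons v vs ih =>
    rw [List.flatMap_cons, List.flatMap_cons]
    by_cases he : v = v0
    · subst he
      have hnot : ∀ w ∈ vs, (pvGet p.2 k == some w) = false := by
        intro w hw
        have : w ≠ v := fun hh => (List.nodup_cons.1 hnd).1 (hh ▸ hw)
        simp [hv, Ne.symm this]
      rw [pvFlatMap_filter_cons_not k p rest vs hnot]
      rw [List.filter_cons, if_pos (by simp [hv])]
      exact List.Perm.refl _
    · have hcond : (pvGet p.2 k == some v) = false := by simp [hv, Ne.symm he]
      rw [List.filter_cons, if_neg (by simp [hcond])]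
      have hmem : v0 ∈ vs := by
        rcases List.mem_cons.1 hv0 with h' | h'
        · exact absurd h'.symm he
        · exact h'
      have := ih (List.nodup_cons.1 hnd).2 hmem
      exact (List.Perm.append_left _ this).trans List.perm_middle

theorem pvPerm_partition (samples : List (List (String × String))) (k : String)
    (o' : List (Int × List (String × String)))
    (hcomp : ∀ p ∈ o', ∀ v, pvGet p.2 k = some v → v ∈ pvFirsts samples k) :
    (o'.filter (fun p => (pvGet p.2 k).isNone)
      ++ (pvFirsts samples k).flatMap
          (fun v => o'.filter (fun p => pvGet p.2 k == some v))).Perm o' := by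
  induction o' with
  | nil => simp
  | cons p rest ih =>
    have ih' := ih (fun q hq v hv => hcomp q (List.mem_cons_of_mem _ hq) v hv)
    cases hv : pvGet p.2 k with
    | none =>
      rw [List.filter_cons, if_pos (by simp [hv])]
      rw [pvFlatMap_filter_cons_not k p rest _ (by intro v _; simp [hv])]
      rw [List.cons_append]
      exact List.Perm.cons p ih'
    | some v0 =>
      have hv0 : v0 ∈ pvFirsts samples k := hcomp p List.mem_cons_self v0 hv
      rw [List.filter_cons, if_neg (by simp [hv])]
      exact ((List.Perm.append_left _
          (pvFlatMap_filter_cons_mem k p rest _ (pvFirsts_nodup k samples) v0 hv hv0)).trans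
        List.perm_middle).trans (List.Perm.cons p ih')

-- ---- each bucket pass sharpens the strict ordering by one field ----

theorem pvSKey_cons (samples : List (List (String × String))) (k : String)
    (ks : List String) (p : Int × List (String × String)) :
    pvSKey samples (k :: ks) p
      = pvComp (pvOrders samples) p.2 k :: pvSKey samples ks p := rfl

theorem pvPass'_pairwise (samples : List (List (String × String))) (k : String)
    (hk : k ∈ pvKeys) (ks : List String)
    (o' : List (Int × List (String × String)))
    (hpw : o'.Pairwise (fun p q => pvSKey samples ks p < pvSKey samples ks q)) :
    (pvPass' samples o' k).Pairwise
      (fun p q => pvSKey samples (k :: ks) p < pvSKey samples (k :: ks) q) := by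
  unfold pvPass'
  rw [PySem.List.foldl_append_eq_flatMap, List.pairwise_append]
  refine ⟨?_, ?_, ?_⟩
  · refine (hpw.filter _).imp_of_mem ?_
    intro a b ha hb hR
    have hva : pvGet a.2 k = none := by
      have := List.of_mem_filter ha
      simpa [Option.isNone_iff_eq_none] using this
    have hvb : pvGet b.2 k = none := by
      have := List.of_mem_filter hb
      simpa [Option.isNone_iff_eq_none] using this
    rw [pvSKey_cons, pvSKey_cons, pvComp_none samples _ _ hva, pvComp_none samples _ _ hvb]
    exact List.cons_lt_cons_iff.2 (Or.inr ⟨rfl, hR⟩)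
  · rw [List.pairwise_flatMap]
    constructor
    · intro v _
      refine (hpw.filter _).imp_of_mem ?_
      intro a b ha hb hR
      have hva : pvGet a.2 k = some v := by
        have := List.of_mem_filter ha; simpa using this
      have hvb : pvGet b.2 k = some v := by
        have := List.of_mem_filter hb; simpa using this
      rw [pvSKey_cons, pvSKey_cons, pvComp_eq_rank samples _ _ _ hva,
        pvComp_eq_rank samples _ _ _ hvb]
      exact List.cons_lt_cons_iff.2 (Or.inr ⟨rfl, hR⟩)
    · have hF : (pvFirsts samples k).Pairwise
          (fun v w => pvRank samples k v < pvRank samples k w) := by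
        rw [List.pairwise_iff_getElem]
        intro i j hi hj hij
        rw [pvRank_firsts samples k hk i hi, pvRank_firsts samples k hk j hj]
        exact_mod_cast hij
      refine hF.imp ?_
      intro v w hvw x hx y hy
      have hxv : pvGet x.2 k = some v := by
        have := List.of_mem_filter hx; simpa using this
      have hyw : pvGet y.2 k = some w := by
        have := List.of_mem_filter hy; simpa using this
      rw [pvSKey_cons, pvSKey_cons, pvComp_eq_rank samples _ _ _ hxv,
        pvComp_eq_rank samples _ _ _ hyw]
      exact List.cons_lt_cons_iff.2 (Or.inl hvw)
  · intro a ha b hb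
    have hva : pvGet a.2 k = none := by
      have := List.of_mem_filter ha
      simpa [Option.isNone_iff_eq_none] using this
    obtain ⟨v, hvF, hbv⟩ := List.mem_flatMap.1 hb
    have hvb : pvGet b.2 k = some v := by
      have := List.of_mem_filter hbv; simpa using this
    obtain ⟨i, hi, hiv⟩ := List.mem_iff_getElem.1 hvF
    have hrank : pvRank samples k v = i := by
      rw [← hiv]; exact pvRank_firsts samples k hk i hi
    rw [pvSKey_cons, pvSKey_cons, pvComp_none samples _ _ hva,
      pvComp_eq_rank samples _ _ _ hvb, hrank]
    exact List.cons_lt_cons_iff.2 (Or.inl (by omega))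

-- ---- the radix invariant over the reversed field list ----

theorem pvRadix_inv (samples : List (List (String × String))) (ks : List String)
    (hks : ∀ k ∈ ks, k ∈ pvKeys) :
    ((ks.reverse.foldl (pvPass' samples) (PySem.List.enumerate samples 0)).Perm
        (PySem.List.enumerate samples 0))
    ∧ (ks.reverse.foldl (pvPass' samples) (PySem.List.enumerate samples 0)).Pairwise
        (fun p q => pvSKey samples ks p < pvSKey samples ks q) := by
  induction ks with
  | nil =>
    refine ⟨List.Perm.refl _, ?_⟩
    refine (PySem.List.pairwise_lt_enumerate samples 0).imp ?_
    intro p q h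
    show ([p.1] : List Int) < [q.1]
    exact List.cons_lt_cons_iff.2 (Or.inl h)
  | cons k ks ih =>
    obtain ⟨hperm, hpw⟩ := ih (fun w hw => hks w (List.mem_cons_of_mem _ hw))
    rw [List.reverse_cons, List.foldl_append, List.foldl_cons, List.foldl_nil]
    set prev := ks.reverse.foldl (pvPass' samples) (PySem.List.enumerate samples 0) with hprev
    constructor
    · refine List.Perm.trans ?_ hperm
      have hcomp : ∀ p ∈ prev, ∀ v, pvGet p.2 k = some v → v ∈ pvFirsts samples k := by
        intro p hp v hv
        have hpe : p ∈ PySem.List.enumerate samples 0 := hperm.subset hp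
        obtain ⟨j, hj, hpj⟩ := (PySem.List.mem_enumerate_iff samples 0 p).1 hpe
        have hps : p.2 ∈ samples := by
          rw [hpj]; exact List.getElem_mem hj
        exact pvFirsts_complete k samples p.2 v hps hv
      have := pvPerm_partition samples k prev hcomp
      unfold pvPass'
      rw [PySem.List.foldl_append_eq_flatMap]
      exact this
    · exact pvPass'_pairwise samples k (hks k List.mem_cons_self) ks prev hpw

-- ---- A's stable sort equals the strict sort of the decorated list ----

def pvKfull (samples : List (List (String × String)))
    (s : List (String × String)) : List Int :=
  pvKeys.map (fun k => pvComp (pvOrders samples) s k)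

def pvKdec (samples : List (List (String × String)))
    (p : Int × List (String × String)) : List Int :=
  pvKfull samples p.2 ++ [p.1]

theorem pvLexAppend (u : List Int) (i j : Int) (hij : j < i) :
    ∀ v : List Int, u.length = v.length → ((u ++ [i] < v ++ [j]) ↔ u < v) := by
  induction u with
  | nil =>
    intro v hl
    cases v with
    | nil =>
      simp only [List.nil_append, List.cons_lt_cons_iff]
      constructor
      · rintro (h | ⟨rfl, h⟩)
        · omega
        · exact absurd h (by simp)
      · intro h
        exact absurd h (by simp)
    | cons b v => simp at hl
  | cons a u ihu =>
    intro v hl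
    cases v with
    | nil => simp at hl
    | cons b v =>
      simp only [List.cons_append, List.cons_lt_cons_iff]
      rw [ihu v (by simpa using hl)]

theorem pvInsertBy_snd (samples : List (List (String × String)))
    (x : List (String × String)) (n : Int)
    (acc' : List (Int × List (String × String))) (hb : ∀ p ∈ acc', p.1 < n) :
    (PySem.List.insertBy (fun a b => decide (pvKdec samples a < pvKdec samples b))
        (n, x) acc').map (fun p => p.2)
      = PySem.List.insertBy (fun a b => decide (pvKfull samples a < pvKfull samples b))
          x (acc'.map (fun p => p.2)) := by
  induction acc' with
  | nil => rfl
  | cons q acc ih =>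
    have hq : q.1 < n := hb q List.mem_cons_self
    have hcond : (pvKdec samples (n, x) < pvKdec samples q)
        ↔ (pvKfull samples x < pvKfull samples q.2) := by
      unfold pvKdec
      exact pvLexAppend _ _ _ hq _ (by simp [pvKfull])
    simp only [PySem.List.insertBy, List.map_cons]
    by_cases h : pvKfull samples x < pvKfull samples q.2
    · rw [if_pos (by simp [hcond, h]), if_pos (by simp [h])]
      simp
    · rw [if_neg (by simp [hcond, h]), if_neg (by simp [h])]
      rw [List.map_cons, ih (fun p hp => hb p (List.mem_cons_of_mem _ hp))]

theorem pvFoldInsert_snd (samples : List (List (String × String)))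
    (l : List (List (String × String))) (n : Int)
    (acc' : List (Int × List (String × String))) (hb : ∀ p ∈ acc', p.1 < n) :
    ((PySem.List.enumerate l n).foldl
        (fun acc x => PySem.List.insertBy
          (fun a b => decide (pvKdec samples a < pvKdec samples b)) x acc)
        acc').map (fun p => p.2)
      = l.foldl
          (fun acc x => PySem.List.insertBy
            (fun a b => decide (pvKfull samples a < pvKfull samples b)) x acc)
          (acc'.map (fun p => p.2)) := by
  induction l generalizing n acc' with
  | nil => rfl
  | cons s rest ih =>
    rw [PySem.List.enumerate_cons, List.foldl_cons, List.foldl_cons]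
    have hb' : ∀ p ∈ PySem.List.insertBy
        (fun a b => decide (pvKdec samples a < pvKdec samples b)) (n, s) acc',
        p.1 < n + 1 := by
      intro p hp
      rcases (PySem.List.mem_insertBy _ _ _ _).1 hp with rfl | hmem
      · omega
      · have := hb p hmem; omega
    rw [ih (n + 1) _ hb', pvInsertBy_snd samples s n acc' hb]

-- the same stable insertion sort with the LinearOrder-derived Decidable
-- instance of the lex order (instances of Decidable are subsingletons)
theorem pvSortedBridge {α : Type} (xs : List α) (key : α → List Int) :
    PySem.List.sorted xs key false
      = @PySem.List.sorted α (List Int) List.instLinearOrder.toLT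
          LinearOrder.toDecidableLT xs key false := by
  congr 1

theorem pvStab (samples : List (List (String × String))) :
    PySem.List.sorted samples (pvKfull samples) false
      = (PySem.List.sorted (PySem.List.enumerate samples 0) (pvKdec samples) false).map
          (fun p => p.2) := by
  rw [PySem.List.sorted_eq_foldl_insertBy, PySem.List.sorted_eq_foldl_insertBy]
  exact (pvFoldInsert_snd samples samples 0 [] (by simp)).symm

-- ---- assembly ----

theorem pvMain (samples : List (List (String × String))) :
    samples_sorted_by_section samples = samples_sorted_by_section_alt samples := by
  have hkey : pvSortOrder (samples.foldl pvRankStep pvInitOrders) = pvKfull samples := by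
    funext s
    rw [pvSortOrder_eq_map]
    rfl
  unfold samples_sorted_by_section
  rw [hkey, pvStab]
  have hradix := pvRadix_inv samples pvKeys (fun k hk => hk)
  have hsorted : @PySem.List.sorted _ (List Int) List.instLinearOrder.toLT
        LinearOrder.toDecidableLT (PySem.List.enumerate samples 0) (pvKdec samples) false
      = pvKeys.reverse.foldl (pvPass' samples) (PySem.List.enumerate samples 0) :=
    PySem.List.sorted_eq_of_perm_of_pairwise_lt _ _ _ hradix.1 hradix.2
  rw [pvSortedBridge, hsorted, pvFold_map_snd, PySem.List.map_snd_enumerate]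
  rfl

-- ===== VERDICT (by name: the statement is the Claim_ definition above) =====
theorem samples_sorted_by_section_spec : Claim_equal_samples_sorted_by_section := by
  intro samples _
  exact pvMain samples
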